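-- pv_equiv track=rewrite | github.com/google/bumble | bumble/core.py | bit_flags_to_strings
-- ===== SOURCE A (Python) =====
-- def bit_flags_to_strings(bits, bit_flag_names):
--     names = []
--     index = 0
--     while bits != 0:
--         if bits & 1:
--             name = bit_flag_names[index] if index < len(bit_flag_names) else f'#{index}'
--             names.append(name)
--         bits >>= 1
--         index += 1
--
--     return names
-- ===== SOURCE B (Python) =====
-- def bit_flags_to_strings(bits, bit_flag_names):
--     names = []
--     while bits != 0:
--         rest = bits & (bits - 1)          # clear the lowest set bit
--         index = (bits - rest).bit_length() - 1   # position of that bit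
--         names.append(bit_flag_names[index] if index < len(bit_flag_names) else f'#{index}')
--         bits = rest
--     return names
-- ===== Notes on version B (the rewrite author's own statement) =====
-- stated objective: alternative
-- what changed: Instead of shifting bits right one position per iteration while keeping a running index and testing the low bit, B iterates once per SET bit: it clears the lowest set bit with bits & (bits-1) and recovers its position from the bit_length of the isolated bit.
import Mathlib
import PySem

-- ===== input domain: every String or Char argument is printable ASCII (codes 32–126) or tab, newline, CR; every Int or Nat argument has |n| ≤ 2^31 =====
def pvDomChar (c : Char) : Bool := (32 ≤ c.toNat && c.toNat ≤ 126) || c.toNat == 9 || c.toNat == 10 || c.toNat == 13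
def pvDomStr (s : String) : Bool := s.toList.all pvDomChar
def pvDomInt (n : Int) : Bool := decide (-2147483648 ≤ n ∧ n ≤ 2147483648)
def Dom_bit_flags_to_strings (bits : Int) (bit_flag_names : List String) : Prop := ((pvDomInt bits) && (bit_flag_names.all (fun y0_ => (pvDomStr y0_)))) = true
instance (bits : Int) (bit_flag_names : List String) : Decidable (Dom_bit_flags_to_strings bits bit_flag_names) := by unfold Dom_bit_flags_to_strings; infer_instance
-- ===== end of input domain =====

-- B replaces A's shift-every-position loop by a loop that jumps straight to each set
-- bit (clear-lowest-set-bit / bit_length), an alternative decomposition of the same task.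

-- name of flag bit `index` (the ternary both Pythons compute per appended name)
def pvBitName (bfn : List String) (index : Int) : String :=
  if index < (bfn.length : Int) then PySem.List.pyGetD bfn index "" else "#" ++ PySem.Int.toStr index

-- ===== PORT A =====
-- A's while loop: shift bits right one position at a time, testing the low bit.
-- `if bits ≤ 0 then names` is A's `while bits != 0` exit plus a totality guard for
-- negative bits, on which the Python loop never terminates (excluded by Pre_).
def pvAGo (bfn : List String) (bits : Int) (names : List String) (index : Int) : List String :=
  if h : bits ≤ 0 then names
  else pvAGo bfn (PySem.Int.floordiv bits 2)
        (if PySem.Int.band bits 1 ≠ 0 then names ++ [pvBitName bfn index] else names)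
        (index + 1)
termination_by bits.toNat
decreasing_by
  have h1 : PySem.Int.floordiv bits 2 < bits := by
    rw [PySem.Int.floordiv_lt_iff_lt_mul (by norm_num)]; omega
  have _h2 : (0:Int) ≤ PySem.Int.floordiv bits 2 := by
    rw [PySem.Int.le_floordiv_iff_mul_le (by norm_num)]; omega
  omega

def bit_flags_to_strings (bits : Int) (bit_flag_names : List String) : List String :=
  pvAGo bit_flag_names bits [] 0

-- ===== PORT B =====
-- B's while loop: clear the lowest set bit each iteration, recovering its index
-- via bit_length.  Same totality guard for negative bits (outside Pre_).
def pvBGo (bfn : List String) (bits : Int) (names : List String) : List String :=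
  if bits ≤ 0 then names
  else
    let rest := PySem.Int.band bits (bits - 1)
    pvBGo bfn rest
      (names ++ [pvBitName bfn ((PySem.Int.bitLength (bits - rest) : Int) - 1)])
termination_by bits.toNat
decreasing_by
  have h0 : PySem.Int.band bits (bits - 1) = ((bits.toNat &&& (bits - 1).toNat : Nat) : Int) :=
    PySem.Int.band_of_nonneg (by omega) (by omega)
  have h1 : bits.toNat &&& (bits - 1).toNat ≤ (bits - 1).toNat := Nat.and_le_right
  simp only [h0]
  omega

def bit_flags_to_strings_alt (bits : Int) (bit_flag_names : List String) : List String :=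
  pvBGo bit_flag_names bits []

-- ===== PRECONDITION & SPEC =====
-- Pre_ excludes negative bits, on which the Python A (and B) loops forever and returns nothing.
def Pre_bit_flags_to_strings (bits : Int) (bit_flag_names : List String) : Prop := 0 ≤ bits
instance (bits : Int) (bit_flag_names : List String) : Decidable (Pre_bit_flags_to_strings bits bit_flag_names) := by unfold Pre_bit_flags_to_strings; infer_instance
def pvWitness_bit_flags_to_strings : Int × List String := (5, ["a", "b"])

def Spec_bit_flags_to_strings (bits : Int) (bit_flag_names : List String) (out : List String) : Prop := out = bit_flags_to_strings_alt bits bit_flag_names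
instance (bits : Int) (bit_flag_names : List String) (out : List String) : Decidable (Spec_bit_flags_to_strings bits bit_flag_names out) := by unfold Spec_bit_flags_to_strings; infer_instance

-- ===== CLAIM (what is proved, stated in full; the proofs are below) =====
def Claim_equal_bit_flags_to_strings : Prop := ∀ (bits : Int) (bit_flag_names : List String), Dom_bit_flags_to_strings bits bit_flag_names → Pre_bit_flags_to_strings bits bit_flag_names → Spec_bit_flags_to_strings bits bit_flag_names (bit_flags_to_strings bits bit_flag_names)

-- ===== LEMMAS AND PROOFS =====

-- Pure model of A's loop tail on a natural number: names of the set bits of n, offset i.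
def pvGA (bfn : List String) (n : Nat) (i : Int) : List String :=
  if n = 0 then []
  else (if n % 2 = 1 then [pvBitName bfn i] else []) ++ pvGA bfn (n / 2) (i + 1)
termination_by n
decreasing_by exact Nat.div_lt_self (by omega) (by norm_num)

theorem pvFloordiv_two (n : Nat) : PySem.Int.floordiv (n : Int) 2 = ((n / 2 : Nat) : Int) := by
  rw [PySem.Int.floordiv_eq_iff_of_pos (by norm_num)]
  push_cast
  omega

-- A's loop computes the model.
theorem pvAGo_eq (bfn : List String) (n : Nat) :
    ∀ (i : Int) (names : List String), pvAGo bfn (n : Int) names i = names ++ pvGA bfn n i := by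
  induction n using Nat.strong_induction_on with
  | _ n ih =>
    intro i names
    rw [pvAGo, pvGA]
    by_cases h0 : n = 0
    · simp [h0]
    · have hpos : ¬ ((n : Int) ≤ 0) := by omega
      simp only [hpos, if_neg h0]
      rw [pvFloordiv_two, show ((1:Int)) = ((1:Nat):Int) from rfl, PySem.Int.band_natCast,
        ih (n / 2) (Nat.div_lt_self (by omega) (by norm_num))]
      rcases Nat.mod_two_eq_zero_or_one n with hm | hm
      · simp [Nat.and_one_is_mod, hm]
      · simp [Nat.and_one_is_mod, hm]

-- bit_length of a power of two.
theorem pvBitLength_pow (i : Nat) : PySem.Int.bitLength ((2 ^ i : Nat) : Int) = i + 1 := by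
  induction i with
  | zero => decide
  | succ k ih =>
    rw [PySem.Int.bitLength_natCast (Nat.two_pow_pos (k + 1))]
    have h : 2 ^ (k + 1) / 2 = 2 ^ k := by
      rw [pow_succ, Nat.mul_div_cancel _ (by norm_num)]
    rw [h, ih]

-- clearing the lowest set bit of 2^i * n for odd n leaves 2^i * (n - 1).
theorem pvClear_low (i n : Nat) (hodd : n % 2 = 1) :
    (2 ^ i * n) &&& (2 ^ i * n - 1) = 2 ^ i * (n - 1) := by
  obtain ⟨m, rfl⟩ : ∃ m, n = m + 1 := ⟨n - 1, by omega⟩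
  have hpow : 0 < 2 ^ i := Nat.two_pow_pos i
  have hsub : 2 ^ i * (m + 1) - 1 = 2 ^ i * m + (2 ^ i - 1) := by
    have : 2 ^ i * (m + 1) = 2 ^ i * m + 2 ^ i := by ring
    omega
  apply Nat.eq_of_testBit_eq
  intro j
  rw [Nat.testBit_land, hsub, Nat.testBit_two_pow_mul_add _ (by omega),
    show 2 ^ i * (m + 1) = (m + 1) * 2 ^ i by ring, Nat.testBit_mul_two_pow,
    show 2 ^ i * (m + 1 - 1) = m * 2 ^ i by simp [Nat.mul_comm], Nat.testBit_mul_two_pow]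
  by_cases hj : i ≤ j
  · simp only [hj, decide_true, Bool.true_and, if_neg (by omega : ¬ j < i)]
    rcases Nat.eq_zero_or_pos (j - i) with hk | hk
    · have hmeven : m % 2 = 0 := by omega
      rw [hk, Nat.testBit_zero, Nat.testBit_zero]
      simp [Nat.add_mod, hmeven]
    · obtain ⟨k, hk'⟩ : ∃ k, j - i = k + 1 := ⟨j - i - 1, by omega⟩
      rw [hk', Nat.testBit_add_one, Nat.testBit_add_one]
      have h2 : (m + 1) / 2 = m / 2 := by omega
      rw [h2, Bool.and_self]
  · simp [hj, if_pos (by omega : j < i)]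

-- B's loop on 2^i * n computes the model at offset i.
theorem pvBGo_eq (bfn : List String) (n : Nat) :
    ∀ (i : Nat) (names : List String),
      pvBGo bfn ((2 ^ i * n : Nat) : Int) names = names ++ pvGA bfn n (i : Int) := by
  induction n using Nat.strong_induction_on with
  | _ n ih =>
    intro i names
    have hpow : 0 < 2 ^ i := Nat.two_pow_pos i
    by_cases h0 : n = 0
    · rw [pvBGo, pvGA]; simp [h0]
    rcases Nat.mod_two_eq_zero_or_one n with hm | hm
    · -- even case: 2^i * n = 2^(i+1) * (n/2), and the model skips to offset i+1
      have hrw : 2 ^ i * n = 2 ^ (i + 1) * (n / 2) := by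
        have h2 : n = 2 * (n / 2) := by omega
        calc 2 ^ i * n = 2 ^ i * (2 * (n / 2)) := by rw [← h2]
        _ = 2 ^ (i + 1) * (n / 2) := by rw [pow_succ]; ring
      rw [hrw, ih (n / 2) (Nat.div_lt_self (by omega) (by norm_num)) (i + 1) names]
      have hne : ¬ n % 2 = 1 := by omega
      conv_rhs => rw [pvGA]
      rw [if_neg h0, if_neg hne]
      simp only [List.nil_append]
      push_cast
      rfl
    · -- odd case: the cleared bit is bit i
      have hm0 : 0 < 2 ^ i * n := Nat.mul_pos hpow (by omega)
      have hguard : ¬ (((2 ^ i * n : Nat) : Int) ≤ 0) := by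
        have : (0:Int) < ((2 ^ i * n : Nat) : Int) := by exact_mod_cast hm0
        omega
      rw [pvBGo, pvGA]
      simp only [hguard, if_neg h0]
      have hcast : ((2 ^ i * n : Nat) : Int) - 1 = ((2 ^ i * n - 1 : Nat) : Int) := by
        push_cast [hm0]; omega
      rw [hcast, PySem.Int.band_natCast]
      have hclear := pvClear_low i n hm
      have hdiff : ((2 ^ i * n : Nat) : Int) - ((2 ^ i * (n - 1) : Nat) : Int)
          = ((2 ^ i : Nat) : Int) := by
        have he : 2 ^ i * n = 2 ^ i * (n - 1) + 2 ^ i := by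
          have h2 : n = (n - 1) + 1 := by omega
          calc 2 ^ i * n = 2 ^ i * ((n - 1) + 1) := by rw [← h2]
          _ = 2 ^ i * (n - 1) + 2 ^ i := by ring
        push_cast [he]; ring
      rw [hclear, hdiff, pvBitLength_pow]
      have hrw : 2 ^ i * (n - 1) = 2 ^ (i + 1) * (n / 2) := by
        have h2 : n - 1 = 2 * (n / 2) := by omega
        rw [h2, pow_succ]; ring
      rw [hrw, ih (n / 2) (Nat.div_lt_self (by omega) (by norm_num)) (i + 1)]
      simp [hm, List.append_assoc]

-- ===== VERDICT (by name: the statement is the Claim_ definition above) =====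
theorem bit_flags_to_strings_spec : Claim_equal_bit_flags_to_strings := by
  intro bits bfn _ hpre
  have hpre' : 0 ≤ bits := hpre
  unfold Spec_bit_flags_to_strings bit_flags_to_strings bit_flags_to_strings_alt
  have hb : bits = ((bits.toNat : Nat) : Int) := by omega
  rw [hb, pvAGo_eq]
  have := pvBGo_eq bfn bits.toNat 0 []
  simpa using this.symm
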